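-- pv_equiv track=rewrite | github.com/Awsthyn/bioinformatics | Bioinformatics Algorithms Chapter 1.py | frequent_words_clump_finding
-- ===== SOURCE A (Python) =====
-- def frequent_words_clump_finding(text, k, t):
--     hash_table = {}
--     for i in range(len(text) - k):
--         try:
--             hash_table[text[i: i+k]] += 1
--         except KeyError:
--             hash_table[text[i: i+k]] = 1
--
--     result = dict(filter(lambda elem: elem[1] == t-1, hash_table.items()))
--     return list(result.keys())
-- ===== SOURCE B (Python) =====
-- def frequent_words_clump_finding(text, k, t):
--     kmers = [text[i: i+k] for i in range(len(text) - k)]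
--     # sort, then one linear run-length scan collects the k-mers seen exactly t-1 times
--     good = set()
--     s = sorted(kmers)
--     if s:
--         cur, n = s[0], 1
--         for y in s[1:]:
--             if y == cur:
--                 n += 1
--             else:
--                 if n == t - 1:
--                     good.add(cur)
--                 cur, n = y, 1
--         if n == t - 1:
--             good.add(cur)
--     # emit in first-occurrence order
--     result = []
--     seen = set()
--     for kmer in kmers:
--         if kmer not in seen:
--             seen.add(kmer)
--             if kmer in good:
--                 result.append(kmer)
--     return result
-- ===== Notes on version B (the rewrite author's own statement) =====
-- stated objective: alternative
-- what changed: Replaces the hash-table counting pass with sort-then-linear-run-length-scan to collect the k-mers occurring exactly t-1 times, then a single seen-set pass over the k-mer stream emits them in first-occurrence order.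
import Mathlib
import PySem

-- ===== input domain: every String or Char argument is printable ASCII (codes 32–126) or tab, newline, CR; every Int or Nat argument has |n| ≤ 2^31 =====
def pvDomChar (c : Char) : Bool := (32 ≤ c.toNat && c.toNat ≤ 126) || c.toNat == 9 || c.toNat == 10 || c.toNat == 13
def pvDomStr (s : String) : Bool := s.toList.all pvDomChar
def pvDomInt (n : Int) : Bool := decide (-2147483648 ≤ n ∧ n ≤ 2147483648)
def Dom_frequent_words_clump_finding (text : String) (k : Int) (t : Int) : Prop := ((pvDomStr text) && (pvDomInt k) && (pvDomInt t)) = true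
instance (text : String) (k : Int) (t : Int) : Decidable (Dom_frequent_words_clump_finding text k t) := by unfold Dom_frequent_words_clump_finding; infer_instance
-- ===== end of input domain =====

-- B replaces A's hash-table counting with sort + one run-length scan collecting the k-mers of
-- multiplicity t-1, emitted by a seen-set pass in first-occurrence order: alternative, not faster.
-- ===== PORT A =====
def frequent_words_clump_finding (text : String) (k : Int) (t : Int) : List String :=
  let hash_table : PySem.Dict String Int :=
    (PySem.List.pyRange 0 (PySem.Str.len text - k) 1).foldl
      (fun d i => d.insert (PySem.Str.slice text (some i) (some (i + k)))
                  (d.getD (PySem.Str.slice text (some i) (some (i + k))) 0 + 1))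
      PySem.Dict.empty
  let result := PySem.Dict.ofList (hash_table.items.filter (fun e => e.2 == t - 1))
  result.keys

-- ===== PORT B =====
-- the 'for y in s[1:]' run-length loop of Source B, with its trailing "if n == t-1: good.add(cur)"
def runScanAux (t : Int) (cur : String) (n : Int) : List String → PySem.Set String → PySem.Set String
  | [], good => if n == t - 1 then PySem.Set.add good cur else good
  | y :: ys, good =>
    if y == cur then runScanAux t cur (n + 1) ys good
    else runScanAux t y 1 ys (if n == t - 1 then PySem.Set.add good cur else good)

def frequent_words_clump_finding_alt (text : String) (k : Int) (t : Int) : List String :=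
  let kmers := (PySem.List.pyRange 0 (PySem.Str.len text - k) 1).map
      (fun i => PySem.Str.slice text (some i) (some (i + k)))
  let good : PySem.Set String :=
    match kmers.mergeSort (fun a b => decide (a ≤ b)) with
    | [] => PySem.Set.empty
    | c :: rest => runScanAux t c 1 rest PySem.Set.empty
  (kmers.foldl
    (fun (st : PySem.Set String × List String) kmer =>
      if PySem.Set.contains st.1 kmer then st
      else (PySem.Set.add st.1 kmer,
            if PySem.Set.contains good kmer then st.2 ++ [kmer] else st.2))
    (PySem.Set.empty, ([] : List String))).2

-- ===== PRECONDITION & SPEC =====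
def Spec_frequent_words_clump_finding (text : String) (k : Int) (t : Int) (out : List String) : Prop := out = frequent_words_clump_finding_alt text k t
instance (text : String) (k : Int) (t : Int) (out : List String) : Decidable (Spec_frequent_words_clump_finding text k t out) := by unfold Spec_frequent_words_clump_finding; infer_instance

-- ===== CLAIM (what is proved, stated in full; the proofs are below) =====
def Claim_equal_frequent_words_clump_finding : Prop := ∀ (text : String) (k : Int) (t : Int), Dom_frequent_words_clump_finding text k t → Spec_frequent_words_clump_finding text k t (frequent_words_clump_finding text k t)

-- ===== LEMMAS AND PROOFS =====

theorem map_fst_pair {α β : Type} (f : α → β) (L : List α) :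
    (L.map (fun x => (x, f x))).map (·.1) = L := by
  induction L with
  | nil => rfl
  | cons a l ih => simp only [List.map_cons] at *; rw [ih]

-- run-length scan on a sorted suffix: membership characterisation
theorem runScanAux_mem (t : Int) : ∀ (ys : List String), ys.Pairwise (· ≤ ·) →
    ∀ (cur : String), (∀ y ∈ ys, cur ≤ y) → ∀ (n : Int) (g : PySem.Set String) (x : String),
      (x ∈ runScanAux t cur n ys g ↔
        x ∈ g ∨ (x = cur ∧ n + (ys.count cur : Int) = t - 1) ∨
          (x ∈ ys ∧ x ≠ cur ∧ (ys.count x : Int) = t - 1)) := by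
  intro ys
  induction ys with
  | nil =>
    intro _ cur _ n g x
    by_cases hnt : n = t - 1
    · simp only [runScanAux, hnt]
      simp [PySem.Set.mem_add]
    · simp [runScanAux, hnt]
  | cons y ys ih =>
    intro hs cur hcur n g x
    obtain ⟨hy, hys⟩ := List.pairwise_cons.mp hs
    by_cases hyc : y = cur
    · subst hyc
      simp only [runScanAux, BEq.rfl, if_pos]
      rw [ih hys y hy (n + 1) g x]
      constructor
      · rintro (h | ⟨rfl, h2⟩ | ⟨h1, h2, h3⟩)
        · exact Or.inl h
        · refine Or.inr (Or.inl ⟨rfl, ?_⟩)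
          rw [List.count_cons_self]; push_cast at h2 ⊢; omega
        · exact Or.inr (Or.inr ⟨List.mem_cons_of_mem _ h1, h2,
            by rw [List.count_cons_of_ne h2.symm]; exact h3⟩)
      · rintro (h | ⟨rfl, h2⟩ | ⟨h1, h2, h3⟩)
        · exact Or.inl h
        · refine Or.inr (Or.inl ⟨rfl, ?_⟩)
          rw [List.count_cons_self] at h2; push_cast at h2 ⊢; omega
        · refine Or.inr (Or.inr ⟨?_, h2, ?_⟩)
          · rcases List.mem_cons.mp h1 with rfl | h
            · exact absurd rfl h2
            · exact h
          · rw [List.count_cons_of_ne h2.symm] at h3; exact h3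
    · have hcy : cur < y := lt_of_le_of_ne (hcur y List.mem_cons_self) (fun h => hyc h.symm)
      have hcnot : cur ∉ y :: ys := by
        intro hmem
        rcases List.mem_cons.mp hmem with h | h
        · exact absurd h.symm (ne_of_gt hcy)
        · exact absurd (hy cur h) (not_le.mpr hcy)
      have hcount0 : (y :: ys).count cur = 0 := List.count_eq_zero.mpr hcnot
      have hbeq : (y == cur) = false := by simp [hyc]
      simp only [runScanAux, hbeq, Bool.false_eq_true, if_false]
      rw [ih hys y hy 1 _ x]
      have hg' : x ∈ (if (n == t - 1) then PySem.Set.add g cur else g) ↔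
          (x ∈ g ∨ (x = cur ∧ n = t - 1)) := by
        by_cases hnt : n = t - 1 <;> simp [hnt, PySem.Set.mem_add]
      rw [hg']
      constructor
      · rintro ((h | ⟨rfl, h2⟩) | ⟨rfl, h2⟩ | ⟨h1, h2, h3⟩)
        · exact Or.inl h
        · refine Or.inr (Or.inl ⟨rfl, ?_⟩)
          rw [hcount0]; push_cast; omega
        · refine Or.inr (Or.inr ⟨List.mem_cons_self, fun h => hyc h, ?_⟩)
          rw [List.count_cons_self]; push_cast at h2 ⊢; omega
        · have hxc : x ≠ cur := fun h => hcnot (h ▸ List.mem_cons_of_mem _ h1)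
          refine Or.inr (Or.inr ⟨List.mem_cons_of_mem _ h1, hxc, ?_⟩)
          rw [List.count_cons_of_ne h2.symm]; exact h3
      · rintro (h | ⟨rfl, h2⟩ | ⟨h1, h2, h3⟩)
        · exact Or.inl (Or.inl h)
        · refine Or.inl (Or.inr ⟨rfl, ?_⟩)
          rw [hcount0] at h2; push_cast at h2; omega
        · by_cases hxy : x = y
          · subst hxy
            refine Or.inr (Or.inl ⟨rfl, ?_⟩)
            rw [List.count_cons_self] at h3; push_cast at h3 ⊢; omega
          · refine Or.inr (Or.inr ⟨?_, hxy, ?_⟩)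
            · rcases List.mem_cons.mp h1 with rfl | h
              · exact absurd rfl hxy
              · exact h
            · rw [List.count_cons_of_ne (Ne.symm hxy)] at h3; exact h3

-- the fresh elements of l relative to seen, in order (proof helper)
def fresh (seen : PySem.Set String) : List String → List String
  | [] => []
  | x :: l => if PySem.Set.contains seen x then fresh seen l
              else x :: fresh (PySem.Set.add seen x) l

theorem foldl_snd (good : PySem.Set String) (l : List String) :
    ∀ (seen : PySem.Set String) (res : List String),
      (l.foldl
        (fun (st : PySem.Set String × List String) kmer =>
          if PySem.Set.contains st.1 kmer then st
          else (PySem.Set.add st.1 kmer,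
                if PySem.Set.contains good kmer then st.2 ++ [kmer] else st.2))
        (seen, res)).2
      = res ++ (fresh seen l).filter (fun x => PySem.Set.contains good x) := by
  induction l with
  | nil => intro seen res; simp [fresh]
  | cons x l ih =>
    intro seen res
    simp only [List.foldl_cons]
    by_cases hx : PySem.Set.contains seen x = true
    · simp only [hx, if_pos, ih, fresh]
    · have hx' : PySem.Set.contains seen x = false := eq_false_of_ne_true hx
      simp only [hx', Bool.false_eq_true, if_false, ih, fresh]
      by_cases hg : x ∈ good
      · simp [hg]
      · simp [hg]

theorem update_eq_fresh (l : List String) :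
    ∀ seen : PySem.Set String, PySem.Set.update seen l = seen ++ fresh seen l := by
  induction l with
  | nil => intro seen; simp [fresh, PySem.Set.update_nil]
  | cons x l ih =>
    intro seen
    rw [PySem.Set.update_cons]
    by_cases hx : x ∈ seen
    · have hc : PySem.Set.contains seen x = true := (PySem.Set.contains_iff seen x).mpr hx
      rw [PySem.Set.add_of_mem hx, ih]
      simp [fresh, hx]
    · have hc : PySem.Set.contains seen x = false := by
        rw [← Bool.not_eq_true]
        exact fun h => hx ((PySem.Set.contains_iff seen x).mp h)
      rw [ih, PySem.Set.add_of_not_mem hx]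
      simp [fresh, hx]

theorem fresh_empty (l : List String) : fresh PySem.Set.empty l = PySem.Set.ofList l := by
  have h := update_eq_fresh l []
  rw [PySem.Set.update_nil_left] at h
  simpa [PySem.Set.empty] using h.symm

-- the run-length scan of the sorted k-mer list recognises exactly the multiplicity-(t-1) k-mers
theorem good_contains (t : Int) (kmers : List String) (x : String) (hx : x ∈ kmers) :
    PySem.Set.contains
      (match kmers.mergeSort (fun a b => decide (a ≤ b)) with
       | [] => PySem.Set.empty
       | c :: rest => runScanAux t c 1 rest PySem.Set.empty) x
    = ((kmers.count x : Int) == t - 1) := by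
  rcases hsort : kmers.mergeSort (fun a b => decide (a ≤ b)) with _ | ⟨c, rest⟩
  · have hnil : kmers = [] := by
      have h := List.mergeSort_perm kmers (fun a b => decide (a ≤ b))
      rw [hsort] at h
      exact (List.Perm.nil_eq h).symm
    simp [hnil] at hx
  · have hperm : (c :: rest).Perm kmers := by
      rw [← hsort]; exact List.mergeSort_perm kmers _
    have hpw : (c :: rest).Pairwise (fun a b => a ≤ b) := by
      rw [← hsort]
      have h := List.pairwise_mergeSort (le := fun a b : String => decide (a ≤ b))
        (fun a b c => by simpa using le_trans) (fun a b => by simpa using le_total a b) kmers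
      exact h.imp (by simp)
    obtain ⟨hc, hrest⟩ := List.pairwise_cons.mp hpw
    have hxs : x ∈ c :: rest := hperm.mem_iff.mpr hx
    have hcnt : ∀ v, (c :: rest).count v = kmers.count v := fun v => hperm.count_eq v
    have hmem := runScanAux_mem t rest hrest c hc 1 PySem.Set.empty x
    by_cases hq : (kmers.count x : Int) = t - 1
    · have hin : x ∈ runScanAux t c 1 rest PySem.Set.empty := by
        rw [hmem]
        right
        by_cases hxc : x = c
        · subst hxc
          left
          refine ⟨rfl, ?_⟩
          have h1 := hcnt x
          rw [List.count_cons_self] at h1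
          rw [← h1] at hq
          push_cast at hq ⊢
          omega
        · right
          have hxr : x ∈ rest := by
            rcases List.mem_cons.mp hxs with rfl | h
            · exact absurd rfl hxc
            · exact h
          refine ⟨hxr, hxc, ?_⟩
          have h1 := hcnt x
          rw [List.count_cons_of_ne (Ne.symm hxc)] at h1
          rw [h1]
          exact hq
      rw [(PySem.Set.contains_iff _ _).mpr hin]
      symm
      simpa using hq
    · have hnot : x ∉ runScanAux t c 1 rest PySem.Set.empty := by
        rw [hmem]
        rintro (h | ⟨rfl, h2⟩ | ⟨h1, h2, h3⟩)
        · simp [PySem.Set.empty] at h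
        · apply hq
          have h1 := hcnt x
          rw [List.count_cons_self] at h1
          rw [← h1]
          push_cast at h2 ⊢
          omega
        · apply hq
          have h1 := hcnt x
          rw [List.count_cons_of_ne (Ne.symm h2)] at h1
          rw [← h1]
          exact h3
      have hfalse : PySem.Set.contains (runScanAux t c 1 rest PySem.Set.empty) x = false := by
        rw [← Bool.not_eq_true]
        exact fun h => hnot ((PySem.Set.contains_iff _ _).mp h)
      rw [hfalse]
      symm
      simpa using hq

-- ===== VERDICT (by name: the statement is the Claim_ definition above) =====
theorem frequent_words_clump_finding_spec : Claim_equal_frequent_words_clump_finding := by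
  unfold Claim_equal_frequent_words_clump_finding
  intro text k t _
  unfold Spec_frequent_words_clump_finding frequent_words_clump_finding frequent_words_clump_finding_alt
  set kmers := (PySem.List.pyRange 0 (PySem.Str.len text - k) 1).map
      (fun i => PySem.Str.slice text (some i) (some (i + k))) with hkm
  set p : String → Bool := fun x => ((kmers.count x : Int) == t - 1) with hp
  -- A side: the counting loop is the counter of the k-mer list
  have hA : (PySem.List.pyRange 0 (PySem.Str.len text - k) 1).foldl
      (fun d i => d.insert (PySem.Str.slice text (some i) (some (i + k)))
                  (d.getD (PySem.Str.slice text (some i) (some (i + k))) 0 + 1))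
      PySem.Dict.empty = PySem.Dict.counter kmers := by
    rw [hkm, ← PySem.Dict.foldl_insert_getD_add_one_eq_counter, List.foldl_map]
  simp only [hA]
  have hmapfst : ((PySem.Set.ofList kmers).filter p |>.map
      (fun x => (x, (kmers.count x : Int)))).map (·.1) = (PySem.Set.ofList kmers).filter p :=
    map_fst_pair _ _
  have hitems : (PySem.Dict.counter kmers).items.filter (fun e => e.2 == t - 1)
      = ((PySem.Set.ofList kmers).filter p).map (fun x => (x, (kmers.count x : Int))) := by
    rw [PySem.Dict.items_counter, List.filter_map]
    rfl
  rw [hitems]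
  have hkeys : (PySem.Dict.ofList (((PySem.Set.ofList kmers).filter p).map
      (fun x => (x, (kmers.count x : Int))))).keys = (PySem.Set.ofList kmers).filter p := by
    have h0 := PySem.Dict.keys_foldl_insert_key
      (((PySem.Set.ofList kmers).filter p).map (fun x => (x, (kmers.count x : Int))))
      (·.1) (fun _ x => x.2) (PySem.Dict.empty (κ := String) (ν := Int))
    have h1 : (PySem.Dict.ofList (((PySem.Set.ofList kmers).filter p).map
        (fun x => (x, (kmers.count x : Int))))).keys
        = PySem.Set.update (PySem.Dict.empty (κ := String) (ν := Int)).keys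
          ((((PySem.Set.ofList kmers).filter p).map (fun x => (x, (kmers.count x : Int)))).map (·.1)) := h0
    rw [h1, hmapfst, PySem.Dict.keys_empty, PySem.Set.update_nil_left]
    exact PySem.Set.ofList_eq_self_of_nodup _ ((PySem.Set.nodup_ofList kmers).filter _)
  rw [hkeys]
  -- B side: the staged passes produce the same filtered first-occurrence list
  rw [foldl_snd, fresh_empty, List.nil_append]
  refine (List.filter_congr ?_).symm
  intro x hx
  exact good_contains t kmers x ((PySem.Set.mem_ofList kmers x).mp hx)
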